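-- pv_equiv track=rewrite | github.com/btn6364/DataStructure-Algorithms | Greedy/job_sequence.py | jobSequence
-- ===== SOURCE A (Python) =====
-- class Job:
--     def __init__(self, id, deadline, profit):
--         self.id = id
--         self.deadline = deadline
--         self.profit = profit
--
--     def __lt__(self, other):
--         return self.profit > other.profit
--
-- def jobSequence(jobs):
--     jobArr = []
--     for id, deadline, profit in jobs:
--         job = Job(id, deadline, profit)
--         jobArr.append(job)
--
--     #Sort the job array
--     jobArr.sort()
--
--     #Try to maximize the profit
--     result = ["#"] * len(jobs)
--     availability = [True] * len(jobs)
--     for job in jobArr: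
--         id, deadline = job.id, job.deadline
--         while deadline >= 1 and not availability[deadline-1]:
--             deadline -= 1
--         if deadline >= 1:
--             result[deadline-1] = id
--             availability[deadline-1] = False
--     return result
-- ===== SOURCE B (Python) =====
-- def jobSequence(jobs):
--     # Union-find over slots: find(d) = latest free slot <= d (0 = none).
--     n = len(jobs)
--     parent = list(range(n + 1))
--     def find(x):
--         path = []
--         while parent[x] != x:
--             path.append(x)
--             x = parent[x]
--         for v in path:
--             parent[v] = x
--         return x
--     result = ["#"] * n
--     for id, deadline, profit in sorted(jobs, key=lambda j: j[2], reverse=True):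
--         if deadline >= 1:
--             slot = find(min(deadline, n))
--             if slot >= 1:
--                 result[slot - 1] = id
--                 parent[slot] = slot - 1
--     return result
-- ===== Notes on version B (the rewrite author's own statement) =====
-- stated objective: alternative
-- what changed: A finds a free slot by scanning the availability array backwards one cell at a time (quadratic in the worst case); B replaces that scan with a union-find over slots with path compression, where find(d) returns the latest free slot <= d.
-- crash fix: A raises IndexError whenever some job's deadline exceeds len(jobs) (it reads availability[deadline-1] out of range); B returns the greedy schedule there, capping the deadline at len(jobs). — e.g. on jobSequence([("a", 3, 5)]): A raises IndexError, B returns ["a"]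
import Mathlib
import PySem

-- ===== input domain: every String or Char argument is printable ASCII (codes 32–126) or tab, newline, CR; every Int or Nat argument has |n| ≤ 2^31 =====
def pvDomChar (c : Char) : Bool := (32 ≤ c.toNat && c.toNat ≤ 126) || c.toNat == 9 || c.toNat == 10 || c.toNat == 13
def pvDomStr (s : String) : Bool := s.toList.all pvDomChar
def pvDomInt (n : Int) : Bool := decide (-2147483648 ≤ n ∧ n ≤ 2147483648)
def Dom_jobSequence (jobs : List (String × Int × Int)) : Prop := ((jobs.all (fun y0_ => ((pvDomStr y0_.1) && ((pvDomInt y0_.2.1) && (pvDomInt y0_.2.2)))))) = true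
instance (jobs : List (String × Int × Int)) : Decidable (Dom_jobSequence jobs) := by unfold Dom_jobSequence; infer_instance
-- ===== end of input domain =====

-- B replaces A's backward linear scan for a free slot by a union-find over slots
-- (find = latest free slot ≤ deadline, with path compression).

-- ===== PORT A =====
-- the inner `while deadline >= 1 and not availability[deadline-1]: deadline -= 1` loop,
-- as structural recursion on the (nonnegative) deadline; in-range reads only inside Pre_
def pvScan (avail : List Bool) : Nat → Nat
  | 0 => 0
  | k+1 => if avail.getD k true = false then pvScan avail k else k + 1

-- one iteration of A's `for job in jobArr` loop; state = (result, availability)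
def stepA (st : List String × List Bool) (job : String × Int × Int) :
    List String × List Bool :=
  let d : Int := if job.2.1 ≥ 1 then ((pvScan st.2 job.2.1.toNat : Nat) : Int) else job.2.1
  if d ≥ 1 then (st.1.set (d.toNat - 1) job.1, st.2.set (d.toNat - 1) false) else st

def jobSequence (jobs : List (String × Int × Int)) : List String :=
  -- jobArr = the Job objects in input order; Job.__lt__ compares profit with '>',
  -- so the stable jobArr.sort() is sorted(key=profit, reverse=True)
  let jobArr := jobs
  let sortedArr := PySem.List.sorted jobArr (fun j => j.2.2) true
  (sortedArr.foldl stepA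
    (List.replicate jobs.length "#", List.replicate jobs.length true)).1

-- ===== PORT B =====
-- B's `find`: follow parent pointers to the root, returning (root, visited path);
-- fuel = len(parent) makes the while-loop structural (parent[x] ≤ x always holds)
def ufFind (parent : List Nat) : Nat → Nat → Nat × List Nat
  | 0, x => (x, [])
  | f+1, x =>
    let p := parent.getD x x
    if p = x then (x, [])
    else
      let r := ufFind parent f p
      (r.1, x :: r.2)

-- one iteration of B's loop; state = (result, parent)
def stepB (n : Nat) (st : List String × List Nat) (job : String × Int × Int) :
    List String × List Nat :=
  if job.2.1 ≥ 1 then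
    let fr := ufFind st.2 st.2.length (min job.2.1.toNat n)
    -- path compression: `for v in path: parent[v] = x`
    let parent := fr.2.foldl (fun a v => a.set v fr.1) st.2
    if fr.1 ≥ 1 then (st.1.set (fr.1 - 1) job.1, parent.set fr.1 (fr.1 - 1))
    else (st.1, parent)
  else st

def jobSequence_alt (jobs : List (String × Int × Int)) : List String :=
  ((PySem.List.sorted jobs (fun j => j.2.2) true).foldl (stepB jobs.length)
    (List.replicate jobs.length "#", List.range (jobs.length + 1))).1

-- ===== PRECONDITION & SPEC =====
-- Pre_ excludes exactly the inputs where A raises IndexError: a job whose deadline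
-- exceeds len(jobs) makes A read availability[deadline-1] out of range.
def Pre_jobSequence (jobs : List (String × Int × Int)) : Prop :=
  ∀ j ∈ jobs, j.2.1 ≤ (jobs.length : Int)
instance (jobs : List (String × Int × Int)) : Decidable (Pre_jobSequence jobs) := by
  unfold Pre_jobSequence; infer_instance
def pvWitness_jobSequence : (List (String × Int × Int)) :=
  [("a", 2, 100), ("b", 1, 19), ("c", 2, 27), ("d", 1, 25), ("e", 3, 15)]

-- A raises IndexError whenever some job's deadline exceeds len(jobs); B returns the
-- greedy schedule there (such a job can take any slot up to len(jobs)).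
def Raises_jobSequence (jobs : List (String × Int × Int)) : Prop :=
  ∃ j ∈ jobs, (jobs.length : Int) < j.2.1
instance (jobs : List (String × Int × Int)) : Decidable (Raises_jobSequence jobs) := by
  unfold Raises_jobSequence; infer_instance
def pvRaiseWitness_jobSequence : (List (String × Int × Int)) := [("a", 3, 5)]
def pvRaiseWitnessOut_jobSequence : List String := ["a"]

def Spec_jobSequence (jobs : List (String × Int × Int)) (out : List String) : Prop :=
  out = jobSequence_alt jobs
instance (jobs : List (String × Int × Int)) (out : List String) : Decidable (Spec_jobSequence jobs out) := by unfold Spec_jobSequence; infer_instance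

-- ===== CLAIM (what is proved, stated in full; the proofs are below) =====
def Claim_equal_jobSequence : Prop := ∀ (jobs : List (String × Int × Int)), Dom_jobSequence jobs → Pre_jobSequence jobs → Spec_jobSequence jobs (jobSequence jobs)
def Claim_raises_jobSequence : Prop := (∀ (jobs : List (String × Int × Int)), Dom_jobSequence jobs → Raises_jobSequence jobs → ¬ Pre_jobSequence jobs) ∧ (Dom_jobSequence (pvRaiseWitness_jobSequence) ∧ Raises_jobSequence (pvRaiseWitness_jobSequence) ∧ jobSequence_alt (pvRaiseWitness_jobSequence) = pvRaiseWitnessOut_jobSequence)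

-- ===== LEMMAS AND PROOFS =====

-- abbreviations for the proofs: pvDec = parent pointers never increase;
-- pvRoot = the root ufFind reaches (fuel x+1 suffices under pvDec)
def pvDec (parent : List Nat) : Prop := ∀ y, parent.getD y y ≤ y

def pvRoot (parent : List Nat) (x : Nat) : Nat := (ufFind parent (x + 1) x).1

lemma ufFind_eq_self (parent : List Nat) (f x : Nat) (h : parent.getD x x = x) :
    ufFind parent (f+1) x = (x, []) := by
  rw [ufFind]; simp only []; rw [if_pos h]

lemma ufFind_eq_step (parent : List Nat) (f x : Nat) (h : parent.getD x x ≠ x) :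
    ufFind parent (f+1) x =
      ((ufFind parent f (parent.getD x x)).1, x :: (ufFind parent f (parent.getD x x)).2) := by
  rw [ufFind]; simp only []; rw [if_neg h]

lemma ufFind_stable (parent : List Nat) (hD : pvDec parent) :
    ∀ x f, x < f → (ufFind parent f x).1 = pvRoot parent x := by
  intro x
  induction x using Nat.strong_induction_on with
  | _ x ih =>
    intro f hf
    obtain ⟨f', rfl⟩ : ∃ f', f = f' + 1 := ⟨f - 1, by omega⟩
    by_cases hp : parent.getD x x = x
    · rw [pvRoot, ufFind_eq_self _ _ _ hp, ufFind_eq_self _ _ _ hp]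
    · have hlt : parent.getD x x < x := lt_of_le_of_ne (hD x) hp
      rw [pvRoot, ufFind_eq_step _ _ _ hp, ufFind_eq_step _ _ _ hp]
      simp only
      rw [ih _ hlt _ (by omega), ih _ hlt _ (by omega)]

lemma pvRoot_of_fix (parent : List Nat) (x : Nat) (h : parent.getD x x = x) :
    pvRoot parent x = x := by
  rw [pvRoot, ufFind_eq_self _ _ _ h]

lemma pvRoot_unfold (parent : List Nat) (hD : pvDec parent) (x : Nat)
    (h : parent.getD x x ≠ x) : pvRoot parent x = pvRoot parent (parent.getD x x) := by
  rw [pvRoot, ufFind_eq_step _ _ _ h]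
  exact ufFind_stable parent hD _ _ (lt_of_le_of_lt (Nat.le_refl _) (by
    have := lt_of_le_of_ne (hD x) h; omega))

lemma pvRoot_le (parent : List Nat) (hD : pvDec parent) (x : Nat) :
    pvRoot parent x ≤ x := by
  induction x using Nat.strong_induction_on with
  | _ x ih =>
    by_cases hp : parent.getD x x = x
    · rw [pvRoot_of_fix _ _ hp]
    · have hlt := lt_of_le_of_ne (hD x) hp
      rw [pvRoot_unfold _ hD _ hp]
      exact le_trans (ih _ hlt) (le_of_lt hlt)

lemma pvRoot_fix (parent : List Nat) (hD : pvDec parent) (x : Nat) :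
    parent.getD (pvRoot parent x) (pvRoot parent x) = pvRoot parent x := by
  induction x using Nat.strong_induction_on with
  | _ x ih =>
    by_cases hp : parent.getD x x = x
    · rw [pvRoot_of_fix _ _ hp]; exact hp
    · have hlt := lt_of_le_of_ne (hD x) hp
      rw [pvRoot_unfold _ hD _ hp]; exact ih _ hlt

lemma pvRoot_root (parent : List Nat) (hD : pvDec parent) (x : Nat) :
    pvRoot parent (pvRoot parent x) = pvRoot parent x :=
  pvRoot_of_fix _ _ (pvRoot_fix parent hD x)

lemma ufFind_path (parent : List Nat) (hD : pvDec parent) :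
    ∀ f x, ∀ v ∈ (ufFind parent f x).2,
      pvRoot parent v = pvRoot parent x ∧ parent.getD v v ≠ v := by
  intro f
  induction f with
  | zero => intro x v hv; simp [ufFind] at hv
  | succ f ih =>
    intro x v hv
    by_cases hp : parent.getD x x = x
    · rw [ufFind_eq_self _ _ _ hp] at hv; simp at hv
    · rw [ufFind_eq_step _ _ _ hp] at hv
      simp only [List.mem_cons] at hv
      rcases hv with rfl | hv
      · exact ⟨rfl, hp⟩
      · obtain ⟨h1, h2⟩ := ih _ v hv
        exact ⟨h1.trans (pvRoot_unfold _ hD _ hp).symm, h2⟩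

lemma getD_set_self {α : Type} (l : List α) (i : Nat) (v d : α) (h : i < l.length) :
    (l.set i v).getD i d = v := by
  simp [List.getD_eq_getElem?_getD, h]

lemma getD_set_ne {α : Type} (l : List α) (i j : Nat) (v d : α) (h : i ≠ j) :
    (l.set i v).getD j d = l.getD j d := by
  simp [List.getD_eq_getElem?_getD, List.getElem?_set_ne h]

lemma getD_oor {α : Type} (l : List α) (i : Nat) (d : α) (h : l.length ≤ i) :
    l.getD i d = d := by
  rw [List.getD_eq_getElem?_getD, List.getElem?_eq_none (by omega)]; rfl

lemma length_foldl_set (path : List Nat) (c : Nat) (a : List Nat) :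
    (path.foldl (fun a v => a.set v c) a).length = a.length := by
  induction path generalizing a with
  | nil => rfl
  | cons h t ih => simp [List.foldl_cons, ih]

lemma getD_foldl_set (path : List Nat) (c : Nat) (a : List Nat) (y d : Nat) :
    (path.foldl (fun a v => a.set v c) a).getD y d =
      if y ∈ path ∧ y < a.length then c else a.getD y d := by
  induction path generalizing a with
  | nil => simp
  | cons h t ih =>
    rw [List.foldl_cons, ih]
    simp only [List.length_set, List.mem_cons]
    split_ifs with h1 h2 h2
    · rfl
    · exact absurd ⟨Or.inr h1.1, h1.2⟩ h2
    · obtain ⟨hor, hlen⟩ := h2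
      have hyh : y = h := by
        rcases hor with hh | ht
        · exact hh
        · exact absurd ⟨ht, hlen⟩ h1
      subst hyh
      exact getD_set_self _ _ _ _ hlen
    · by_cases hyh : y = h
      · subst hyh
        have hlen : ¬ y < a.length := fun hl => h2 ⟨Or.inl rfl, hl⟩
        rw [getD_oor _ _ _ (by simp; omega), getD_oor _ _ _ (by omega)]
      · exact getD_set_ne _ _ _ _ _ (fun hh => hyh hh.symm)

lemma root_preserve (parent parent' : List Nat) (hD : pvDec parent)
    (h : ∀ y, parent'.getD y y = parent.getD y y ∨ parent'.getD y y = pvRoot parent y) :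
    ∀ x, pvRoot parent' x = pvRoot parent x := by
  have hD' : pvDec parent' := by
    intro y
    rcases h y with h1 | h1
    · rw [h1]; exact hD y
    · rw [h1]; exact pvRoot_le _ hD y
  intro x
  induction x using Nat.strong_induction_on with
  | _ x ih =>
    rcases h x with h1 | h1
    · by_cases hfix : parent.getD x x = x
      · rw [pvRoot_of_fix _ _ (h1.trans hfix), pvRoot_of_fix _ _ hfix]
      · have hlt := lt_of_le_of_ne (hD x) hfix
        have hfix' : parent'.getD x x ≠ x := by rw [h1]; exact hfix
        rw [pvRoot_unfold _ hD' _ hfix', pvRoot_unfold _ hD _ hfix, h1]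
        exact ih _ hlt
    · by_cases hrx : pvRoot parent x = x
      · rw [pvRoot_of_fix parent' x (by rw [h1, hrx]), hrx]
      · have hlt : pvRoot parent x < x := lt_of_le_of_ne (pvRoot_le _ hD x) hrx
        have hfix' : parent'.getD x x ≠ x := by rw [h1]; exact hrx
        rw [pvRoot_unfold _ hD' _ hfix', h1, ih _ hlt, pvRoot_root _ hD]

lemma root_link (parent : List Nat) (hD : pvDec parent) (s : Nat) (hs : 1 ≤ s)
    (hlen : s < parent.length) (hfix : parent.getD s s = s) :
    ∀ x, pvRoot (parent.set s (s - 1)) x =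
      if pvRoot parent x = s then pvRoot parent (s - 1) else pvRoot parent x := by
  have hD' : pvDec (parent.set s (s - 1)) := by
    intro y
    by_cases hys : y = s
    · subst hys; rw [getD_set_self _ _ _ _ hlen]; omega
    · rw [getD_set_ne _ _ _ _ _ (fun hh => hys hh.symm)]; exact hD y
  intro x
  induction x using Nat.strong_induction_on with
  | _ x ih =>
    by_cases hxs : x = s
    · subst hxs
      have hget : (parent.set x (x - 1)).getD x x = x - 1 := getD_set_self _ _ _ _ hlen
      have hne : (parent.set x (x - 1)).getD x x ≠ x := by rw [hget]; omega
      rw [pvRoot_unfold _ hD' _ hne, hget, ih _ (by omega)]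
      rw [pvRoot_of_fix _ _ hfix, if_pos rfl,
        if_neg (by have := pvRoot_le _ hD (x - 1); omega)]
    · have hget : (parent.set s (s - 1)).getD x x = parent.getD x x :=
        getD_set_ne _ _ _ _ _ (fun hh => hxs hh.symm)
      by_cases hfixx : parent.getD x x = x
      · rw [pvRoot_of_fix _ _ (hget.trans hfixx), pvRoot_of_fix _ _ hfixx, if_neg hxs]
      · have hlt := lt_of_le_of_ne (hD x) hfixx
        have hne : (parent.set s (s - 1)).getD x x ≠ x := by rw [hget]; exact hfixx
        rw [pvRoot_unfold _ hD' _ hne, hget, ih _ hlt, pvRoot_unfold _ hD _ hfixx]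

lemma pvScan_free (avail : List Bool) (x : Nat) (h : 1 ≤ pvScan avail x) :
    avail.getD (pvScan avail x - 1) true = true := by
  induction x with
  | zero => simp [pvScan] at h
  | succ k ih =>
    by_cases hb : avail.getD k true = false
    · rw [pvScan, if_pos hb] at h ⊢
      exact ih h
    · rw [pvScan, if_neg hb] at h ⊢
      simpa using Bool.not_eq_false _ |>.mp hb

lemma pvScan_set_lower (avail : List Bool) (s : Nat) :
    ∀ m, m ≤ s - 1 → pvScan (avail.set (s - 1) false) m = pvScan avail m := by
  intro m
  induction m with
  | zero => intro; rfl
  | succ k ih =>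
    intro hm
    rw [pvScan, pvScan, getD_set_ne _ _ _ _ _ (by omega)]
    split
    · exact ih (by omega)
    · rfl

lemma pvScan_set (avail : List Bool) (s : Nat) (hs : 1 ≤ s) (hlen : s - 1 < avail.length)
    (hfree : avail.getD (s - 1) true = true) :
    ∀ x, pvScan (avail.set (s - 1) false) x =
      if pvScan avail x = s then pvScan avail (s - 1) else pvScan avail x := by
  intro x
  induction x with
  | zero => simp only [pvScan]; rw [if_neg (by omega)]
  | succ k ih =>
    by_cases hks : k = s - 1
    · have hgetf : (avail.set (s - 1) false).getD k true = false := by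
        rw [hks]; exact getD_set_self _ _ _ _ hlen
      rw [pvScan, hgetf, if_pos rfl, pvScan_set_lower avail s k (by omega)]
      have hkk : pvScan avail (k + 1) = k + 1 := by
        rw [pvScan, hks, hfree]; simp
      rw [hkk, if_pos (by omega), hks]
    · have hget : (avail.set (s - 1) false).getD k true = avail.getD k true :=
        getD_set_ne _ _ _ _ _ (by omega)
      by_cases hb : avail.getD k true = false
      · rw [pvScan, hget, if_pos hb, ih, pvScan, if_pos hb]
      · have h1 : pvScan avail (k + 1) = k + 1 := by rw [pvScan, if_neg hb]
        rw [pvScan, hget, if_neg hb, h1, if_neg (by omega)]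

lemma main_loop (L : List (String × Int × Int)) (n : Nat) :
    ∀ (resA resB : List String) (avail : List Bool) (parent : List Nat),
    avail.length = n → parent.length = n + 1 → resA = resB →
    pvDec parent → (∀ x, pvRoot parent x = pvScan avail x) →
    (∀ j ∈ L, j.2.1 ≤ (n : Int)) →
    (L.foldl stepA (resA, avail)).1 = (L.foldl (stepB n) (resB, parent)).1 := by
  induction L with
  | nil => intro resA resB _ _ _ _ hres _ _ _; simpa using hres
  | cons job t ih =>
    intro resA resB avail parent hlenA hlenP hres hD hroot hjobs
    rw [List.foldl_cons, List.foldl_cons]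
    have hdl := hjobs job (List.mem_cons_self)
    by_cases hpos : job.2.1 ≥ 1
    · -- deadline ≥ 1
      set m := job.2.1.toNat with hm
      have hmn : m ≤ n := by omega
      have hminm : min m n = m := by omega
      -- B's find returns the root of m
      have hfuel : (ufFind parent parent.length (min m n)).1 = pvRoot parent m := by
        rw [hminm, hlenP]; exact ufFind_stable parent hD m (n + 1) (by omega)
      set s := pvRoot parent m with hsdef
      set path := (ufFind parent parent.length (min m n)).2 with hpath
      set parentC := path.foldl (fun a v => a.set v (ufFind parent parent.length (min m n)).1) parent with hpc
      -- compression facts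
      have hptw : ∀ y, parentC.getD y y = parent.getD y y ∨ parentC.getD y y = pvRoot parent y := by
        intro y
        rw [hpc, getD_foldl_set]
        split_ifs with hcond
        · right
          have h2 := (ufFind_path parent hD parent.length (min m n) y hcond.1).1
          rw [hminm] at h2
          rw [hfuel, hsdef]
          exact h2.symm
        · left; rfl
      have hCroots : ∀ x, pvRoot parentC x = pvRoot parent x := root_preserve parent parentC hD hptw
      have hDC : pvDec parentC := by
        intro y
        rcases hptw y with h1 | h1
        · rw [h1]; exact hD y
        · rw [h1]; exact pvRoot_le _ hD y
      have hClen : parentC.length = n + 1 := by rw [hpc, length_foldl_set, hlenP]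
      -- unfold the two steps
      have hsAeq : stepA (resA, avail) job =
          (if (((pvScan avail m : Nat) : Int) ≥ 1) then
            (resA.set (((pvScan avail m : Nat) : Int).toNat - 1) job.1,
             avail.set (((pvScan avail m : Nat) : Int).toNat - 1) false) else (resA, avail)) := by
        rw [stepA]; simp only [hpos, if_pos]; rfl
      have hsBeq : stepB n (resB, parent) job =
          (if s ≥ 1 then (resB.set (s - 1) job.1, parentC.set s (s - 1)) else (resB, parentC)) := by
        rw [stepB]; simp only [hpos, if_true]
        rw [← hm, ← hpath, ← hpc, hfuel]
      by_cases hs : 1 ≤ s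
      · -- slot assigned
        have hscan : pvScan avail m = s := (hroot m).symm ▸ rfl
        have hsm : s ≤ m := hsdef ▸ pvRoot_le _ hD m
        have hfree : avail.getD (s - 1) true = true := by
          rw [← hscan]; exact pvScan_free avail m (by omega)
        have hsnotin : (s : Nat) ∉ path := by
          intro hmem
          have := (ufFind_path parent hD _ _ s hmem).2
          exact this (pvRoot_fix parent hD m)
        have hfixC : parentC.getD s s = s := by
          rw [hpc, getD_foldl_set, if_neg (fun hc => hsnotin hc.1)]
          exact pvRoot_fix parent hD m
        rw [hsAeq, hsBeq, if_pos (by exact_mod_cast hscan ▸ (by omega : (1:Int) ≤ (s:Int))), if_pos hs]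
        have htoNat : (((pvScan avail m : Nat) : Int)).toNat - 1 = s - 1 := by
          rw [hscan]; omega
        rw [htoNat]
        apply ih
        · simpa using hlenA
        · simpa using hClen
        · rw [hres]
        · intro y
          by_cases hys : y = s
          · subst hys; rw [getD_set_self _ _ _ _ (by omega)]; omega
          · rw [getD_set_ne _ _ _ _ _ (fun hh => hys hh.symm)]; exact hDC y
        · intro x
          rw [root_link parentC hDC s hs (by omega) hfixC x, hCroots, hCroots,
            hroot, hroot, pvScan_set avail s hs (by omega) hfree]
        · intro j hj; exact hjobs j (List.mem_cons_of_mem _ hj)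
      · -- slot = 0 : nothing assigned, but B still compressed the path
        have hs0 : s = 0 := by omega
        have hscan : pvScan avail m = 0 := by rw [← hroot m, ← hsdef, hs0]
        rw [hsAeq, hsBeq, if_neg (by rw [hscan]; simp), if_neg hs]
        apply ih _ _ _ _ hlenA hClen hres hDC _ (fun j hj => hjobs j (List.mem_cons_of_mem _ hj))
        intro x; rw [hCroots, hroot]
    · -- deadline < 1 : both steps leave the state unchanged
      have hA : stepA (resA, avail) job = (resA, avail) := by
        rw [stepA]; simp only [hpos, if_false]
      have hB : stepB n (resB, parent) job = (resB, parent) := by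
        rw [stepB, if_neg hpos]
      rw [hA, hB]
      exact ih _ _ _ _ hlenA hlenP hres hD hroot (fun j hj => hjobs j (List.mem_cons_of_mem _ hj))

-- ===== VERDICT (by name: the statement is the Claim_ definition above) =====
theorem jobSequence_spec : Claim_equal_jobSequence := by
  intro jobs _ hpre
  unfold Spec_jobSequence jobSequence jobSequence_alt
  apply main_loop
  · simp
  · simp
  · rfl
  · intro y
    rcases Nat.lt_or_ge y (jobs.length + 1) with h | h
    · rw [List.getD_eq_getElem?_getD, List.getElem?_range h]; simp
    · rw [getD_oor _ _ _ (by simpa using h)]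
  · intro x
    have h1 : (List.range (jobs.length + 1)).getD x x = x := by
      rcases Nat.lt_or_ge x (jobs.length + 1) with h | h
      · rw [List.getD_eq_getElem?_getD, List.getElem?_range h]; simp
      · rw [getD_oor _ _ _ (by simpa using h)]
    have h2 : ∀ k, pvScan (List.replicate jobs.length true) k = k := by
      intro k
      induction k with
      | zero => rfl
      | succ m ih =>
        have hg : (List.replicate jobs.length true).getD m true = true := by
          rcases Nat.lt_or_ge m jobs.length with h | h
          · rw [List.getD_eq_getElem?_getD, List.getElem?_replicate_of_lt h]; rfl
          · exact getD_oor _ _ _ (by simpa using h)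
        rw [pvScan, hg]; simp
    rw [pvRoot_of_fix _ _ h1, h2]
  · intro j hj
    exact hpre j ((PySem.List.mem_sorted _ _ _ _).1 hj)

def jobSequence_raises : Claim_raises_jobSequence := by
  unfold Claim_raises_jobSequence
  constructor
  · rintro jobs _ ⟨j, hj, hlt⟩ hpre
    exact absurd (hpre j hj) (by omega)
  · exact ⟨by decide, by decide, by decide⟩
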